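-- pv_equiv track=rewrite | github.com/luanpao82/pad6149 | Slides/build_slides.py | extract_html_blocks
-- ===== SOURCE A (Python) =====
-- def extract_html_blocks(text: str) -> tuple[str, dict[str, str]]:
--     """Pull top-level HTML blocks out as placeholders.
--
--     A block is any run of non-blank lines where the first line starts with
--     `<` at column 0. This lets the markdown source keep indented, readable
--     HTML without pandoc trying to reinterpret nested tags.
--     """
--     lines = text.split("\n")
--     out: list[str] = []
--     blocks: dict[str, str] = {}
--     i = 0
--     while i < len(lines):
--         line = lines[i]
--         at_block_start = (
--             line.startswith("<")
--             and (i == 0 or lines[i - 1].strip() == "")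
--         )
--         if at_block_start:
--             buf = [line]
--             j = i + 1
--             while j < len(lines) and lines[j].strip() != "":
--                 buf.append(lines[j])
--                 j += 1
--             ph = f"HTMLBLOCK{len(blocks)}X"
--             blocks[ph] = "\n".join(buf)
--             out.append(ph)
--             i = j
--         else:
--             out.append(line)
--             i += 1
--     return "\n".join(out), blocks
-- ===== SOURCE B (Python) =====
-- def extract_html_blocks(text: str) -> tuple[str, dict[str, str]]:
--     """Pull top-level HTML blocks out as placeholders.
--
--     Group-first decomposition: walk the lines in reverse, prepending each
--     line to the current run (a maximal run of equally blank / non-blank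
--     lines), then process each run as a whole: a non-blank run whose first
--     line starts with '<' becomes one placeholder, every other run is
--     emitted verbatim.
--     """
--     groups = []
--     for line in reversed(text.split("\n")):
--         blank = line.strip() == ""
--         if groups and groups[0][0] == blank:
--             groups[0][1].insert(0, line)
--         else:
--             groups.insert(0, (blank, [line]))
--     out = []
--     blocks = {}
--     for blank, grp in groups:
--         if not blank and grp[0].startswith("<"):
--             ph = f"HTMLBLOCK{len(blocks)}X"
--             blocks[ph] = "\n".join(grp)
--             out.append(ph)
--         else:
--             out.extend(grp)
--     return "\n".join(out), blocks
-- ===== Notes on version B (the rewrite author's own statement) =====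
-- stated objective: alternative
-- what changed: Replaced the inline index-advancing nested-while scan by a group-first decomposition: the lines are first segmented (by a reverse pass) into maximal runs of equally blank/non-blank lines, then each run is processed as a whole (a non-blank run whose first line starts with '<' becomes one placeholder, all other runs are emitted verbatim).
import Mathlib
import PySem

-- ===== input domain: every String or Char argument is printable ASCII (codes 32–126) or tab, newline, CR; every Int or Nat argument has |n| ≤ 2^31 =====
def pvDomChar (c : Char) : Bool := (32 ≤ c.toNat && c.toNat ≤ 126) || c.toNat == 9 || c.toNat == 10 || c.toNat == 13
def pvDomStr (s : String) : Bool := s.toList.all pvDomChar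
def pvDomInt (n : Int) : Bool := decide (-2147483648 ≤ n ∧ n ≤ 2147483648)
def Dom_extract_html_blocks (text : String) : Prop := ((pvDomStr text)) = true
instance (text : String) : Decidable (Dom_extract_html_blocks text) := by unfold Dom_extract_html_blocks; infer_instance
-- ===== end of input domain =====

-- B re-implements A by a group-first decomposition (segment lines into maximal blank/non-blank
-- runs in a reverse pass, then process each run as a whole); same return value, not faster.

-- ===== PORT A =====
-- lines are kept as List Char (PySem.Chars is the exact model of Python's str operations).

-- inner while loop: 'while j < len(lines) and lines[j].strip() != "": buf.append(lines[j]); j += 1'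
def aInner (lines : List (List Char)) (j : Nat) (buf : List (List Char)) :
    List (List Char) × Nat :=
  if h : j < lines.length then
    if PySem.Chars.strip lines[j] == [] then (buf, j)
    else aInner lines (j + 1) (buf ++ [lines[j]])
  else (buf, j)
  termination_by lines.length - j

lemma aInner_ge_aux (lines : List (List Char)) : ∀ (n j : Nat) (buf : List (List Char)),
    lines.length - j ≤ n → j ≤ (aInner lines j buf).2 := by
  intro n
  induction n with
  | zero =>
    intro j buf h
    have hj : ¬ j < lines.length := by omega
    rw [aInner]
    simp [hj]
  | succ n ih =>
    intro j buf h
    rw [aInner]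
    by_cases hj : j < lines.length
    · simp only [hj, reduceDIte]
      by_cases hs : (PySem.Chars.strip lines[j] == []) = true
      · simp [hs]
      · rw [if_neg hs]
        have := ih (j + 1) (buf ++ [lines[j]]) (by omega)
        omega
    · simp [hj]

lemma aInner_ge (lines : List (List Char)) (j : Nat) (buf : List (List Char)) :
    j ≤ (aInner lines j buf).2 :=
  aInner_ge_aux lines (lines.length - j) j buf le_rfl

-- outer while loop of A, state (i, out, blocks)
def aLoop (lines : List (List Char)) (i : Nat) (out : List (List Char))
    (bk : PySem.Dict String String) : String × (List (String × String)) :=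
  if h : i < lines.length then
    if PySem.Chars.startswith lines[i] ['<']
        && (decide (i = 0) || (PySem.Chars.strip (lines.getD (i - 1) []) == [])) then
      let r := aInner lines (i + 1) [lines[i]]
      let ph := "HTMLBLOCK".toList ++ PySem.Int.toChars (PySem.Dict.size bk) ++ "X".toList
      aLoop lines r.2 (out ++ [ph])
        (bk.insert (String.ofList ph) (String.ofList (PySem.Chars.join ['\n'] r.1)))
    else
      aLoop lines (i + 1) (out ++ [lines[i]]) bk
  else
    (String.ofList (PySem.Chars.join ['\n'] out), bk.items)
  termination_by lines.length - i
  decreasing_by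
  · have := aInner_ge lines (i + 1) [lines[i]]; omega
  · omega

def extract_html_blocks (text : String) : String × (List (String × String)) :=
  aLoop (PySem.Chars.splitOn text.toList ['\n']) 0 [] PySem.Dict.empty

-- ===== PORT B =====
-- one step of B's reverse grouping pass (line is prepended to the front run or opens a new one)
def bStep (line : List Char) (groups : List (Bool × List (List Char))) :
    List (Bool × List (List Char)) :=
  let blank := PySem.Chars.strip line == []
  match groups with
  | [] => [(blank, [line])]
  | (b, g) :: rest =>
      if b = blank then (b, line :: g) :: rest
      else (blank, [line]) :: (b, g) :: rest

-- 'for line in reversed(text.split("\n")): …' building the run list front-to-back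
def bGroups (lines : List (List Char)) : List (Bool × List (List Char)) :=
  lines.foldr bStep []

-- 'for blank, grp in groups: …' with state (out, blocks)
def bProcess (groups : List (Bool × List (List Char)))
    (out : List (List Char)) (bk : PySem.Dict String String) :
    List (List Char) × PySem.Dict String String :=
  groups.foldl
    (fun acc gp =>
      if !gp.1 && PySem.Chars.startswith (gp.2.headD []) ['<'] then
        let ph := "HTMLBLOCK".toList ++ PySem.Int.toChars (PySem.Dict.size acc.2) ++ "X".toList
        (acc.1 ++ [ph], acc.2.insert (String.ofList ph) (String.ofList (PySem.Chars.join ['\n'] gp.2)))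
      else (acc.1 ++ gp.2, acc.2))
    (out, bk)

def extract_html_blocks_alt (text : String) : String × (List (String × String)) :=
  let r := bProcess (bGroups (PySem.Chars.splitOn text.toList ['\n'])) [] PySem.Dict.empty
  (String.ofList (PySem.Chars.join ['\n'] r.1), r.2.items)

-- ===== PRECONDITION & SPEC =====
def Spec_extract_html_blocks (text : String) (out : String × (List (String × String))) : Prop := out = extract_html_blocks_alt text
instance (text : String) (out : String × (List (String × String))) : Decidable (Spec_extract_html_blocks text out) := by unfold Spec_extract_html_blocks; infer_instance

-- ===== CLAIM (what is proved, stated in full; the proofs are below) =====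
def Claim_equal_extract_html_blocks : Prop := ∀ (text : String), Dom_extract_html_blocks text → Spec_extract_html_blocks text (extract_html_blocks text)

-- ===== LEMMAS AND PROOFS =====

-- common reference recursion: pb = 'previous line blank (or start of text)'
def gSpec (pb : Bool) (ls : List (List Char)) (out : List (List Char))
    (bk : PySem.Dict String String) : String × (List (String × String)) :=
  match ls with
  | [] => (String.ofList (PySem.Chars.join ['\n'] out), bk.items)
  | l :: rest =>
    if pb && PySem.Chars.startswith l ['<'] then
      let buf := l :: rest.takeWhile (fun x => !(PySem.Chars.strip x == []))
      let ph := "HTMLBLOCK".toList ++ PySem.Int.toChars (PySem.Dict.size bk) ++ "X".toList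
      gSpec false (rest.dropWhile (fun x => !(PySem.Chars.strip x == []))) (out ++ [ph])
        (bk.insert (String.ofList ph) (String.ofList (PySem.Chars.join ['\n'] buf)))
    else
      gSpec (PySem.Chars.strip l == []) rest (out ++ [l]) bk
  termination_by ls.length
  decreasing_by
  · simp only [List.length_cons]
    have := List.length_dropWhile_le (fun x => !(PySem.Chars.strip x == [])) rest
    omega
  · simp only [List.length_cons]; omega

-- a line that starts with '<' is not blank
lemma startswith_not_blank (l : List Char)
    (h : PySem.Chars.startswith l ['<'] = true) :
    (PySem.Chars.strip l == []) = false := by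
  obtain ⟨t, rfl⟩ : ∃ t, l = '<' :: t := by
    simp only [PySem.Chars.startswith, List.isPrefixOf_iff_prefix] at h
    obtain ⟨t, ht⟩ := h
    exact ⟨t, ht.symm⟩
  simp only [PySem.Chars.strip, PySem.Chars.lstrip, PySem.Chars.rstrip]
  rw [List.dropWhile_cons]
  have hsp : PySem.Chars.isspace '<' = false := by decide
  rw [hsp]
  simp only [Bool.false_eq_true, if_false, beq_eq_false_iff_ne, ne_eq,
    List.reverse_eq_nil_iff, List.dropWhile_eq_nil_iff]
  intro hall
  have := hall '<' (by simp)
  simp [hsp] at this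

-- contrapositive form: a blank line does not start with '<'
lemma blank_not_startswith (l : List Char)
    (h : (PySem.Chars.strip l == []) = true) :
    PySem.Chars.startswith l ['<'] = false := by
  cases hs : PySem.Chars.startswith l ['<'] with
  | false => rfl
  | true => rw [startswith_not_blank l hs] at h; exact absurd h (by simp)

lemma drop_length_takeWhile {α : Type} (p : α → Bool) (l : List α) :
    l.drop (l.takeWhile p).length = l.dropWhile p := by
  induction l with
  | nil => rfl
  | cons x xs ih =>
    by_cases hp : p x = true
    · simp [hp, ih]
    · simp at hp; simp [hp]

-- ---- A-side: aLoop equals gSpec ----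

lemma aInner_spec_aux (lines : List (List Char)) : ∀ (n j : Nat) (buf : List (List Char)),
    lines.length - j ≤ n →
    aInner lines j buf =
      (buf ++ (lines.drop j).takeWhile (fun x => !(PySem.Chars.strip x == [])),
       j + ((lines.drop j).takeWhile (fun x => !(PySem.Chars.strip x == []))).length) := by
  intro n
  induction n with
  | zero =>
    intro j buf h
    have hj : ¬ j < lines.length := by omega
    rw [aInner, List.drop_eq_nil_of_le (by omega)]
    simp [hj]
  | succ n ih =>
    intro j buf h
    by_cases hj : j < lines.length
    · rw [aInner, List.drop_eq_getElem_cons hj]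
      simp only [hj, reduceDIte]
      by_cases hs : (PySem.Chars.strip lines[j] == []) = true
      · rw [if_pos hs, List.takeWhile_cons_of_neg (by simp [hs])]
        simp
      · rw [if_neg hs, List.takeWhile_cons_of_pos (by simp at hs; simp [hs]),
          ih (j + 1) (buf ++ [lines[j]]) (by omega)]
        simp [List.append_assoc]
        omega
    · rw [aInner, List.drop_eq_nil_of_le (by omega)]
      simp [hj]

lemma aInner_spec (lines : List (List Char)) (j : Nat) (buf : List (List Char)) :
    aInner lines j buf =
      (buf ++ (lines.drop j).takeWhile (fun x => !(PySem.Chars.strip x == [])),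
       j + ((lines.drop j).takeWhile (fun x => !(PySem.Chars.strip x == []))).length) :=
  aInner_spec_aux lines (lines.length - j) j buf le_rfl

def pbAt (lines : List (List Char)) (i : Nat) : Bool :=
  decide (i = 0) || (PySem.Chars.strip (lines.getD (i - 1) []) == [])

lemma gSpec_nil (pb : Bool) (out : List (List Char)) (bk : PySem.Dict String String) :
    gSpec pb [] out bk = (String.ofList (PySem.Chars.join ['\n'] out), bk.items) := by
  rw [gSpec]

lemma gSpec_cons (pb : Bool) (l : List Char) (rest out : List (List Char))
    (bk : PySem.Dict String String) :
    gSpec pb (l :: rest) out bk =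
      if pb && PySem.Chars.startswith l ['<'] then
        gSpec false (rest.dropWhile (fun x => !(PySem.Chars.strip x == [])))
          (out ++ ["HTMLBLOCK".toList ++ PySem.Int.toChars (PySem.Dict.size bk) ++ "X".toList])
          (bk.insert (String.ofList ("HTMLBLOCK".toList ++ PySem.Int.toChars (PySem.Dict.size bk) ++ "X".toList))
            (String.ofList (PySem.Chars.join ['\n']
              (l :: rest.takeWhile (fun x => !(PySem.Chars.strip x == []))))))
      else gSpec (PySem.Chars.strip l == []) rest (out ++ [l]) bk := by
  rw [gSpec]

lemma pbAt_after_run (lines : List (List Char)) (i : Nat) (hi : i < lines.length)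
    (hsw : PySem.Chars.startswith lines[i] ['<'] = true) :
    pbAt lines (i + 1 + ((lines.drop (i + 1)).takeWhile
        (fun x => !(PySem.Chars.strip x == []))).length) = false := by
  set T := (lines.drop (i + 1)).takeWhile (fun x => !(PySem.Chars.strip x == [])) with hT
  unfold pbAt
  cases hTl : T.length with
  | zero =>
    have : i + 1 + 0 - 1 = i := by omega
    rw [this]
    simp [List.getD_eq_getElem?_getD, List.getElem?_eq_getElem hi,
      startswith_not_blank lines[i] hsw]
  | succ m =>
    have hm : m < T.length := by omega
    have hidx : i + 1 + (m + 1) - 1 = (i + 1) + m := by omega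
    rw [hidx]
    have h1 : lines[(i + 1) + m]? = (lines.drop (i + 1))[m]? := List.getElem?_drop.symm
    have h2 : (lines.drop (i + 1))[m]? = T[m]? := by
      conv_lhs => rw [← List.takeWhile_append_dropWhile
        (p := fun x => !(PySem.Chars.strip x == [])) (l := lines.drop (i + 1))]
      rw [List.getElem?_append_left hm]
    have h3 : T[m]? = some T[m] := List.getElem?_eq_getElem hm
    have h4 : (PySem.Chars.strip T[m] == []) = false := by
      have := List.mem_takeWhile_imp (List.getElem_mem hm)
      simpa using this
    rw [List.getD_eq_getElem?_getD, h1, h2, h3]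
    simp [h4]

lemma aLoop_eq_aux (lines : List (List Char)) : ∀ (n i : Nat), lines.length - i ≤ n →
    ∀ (out : List (List Char)) (bk : PySem.Dict String String),
      aLoop lines i out bk = gSpec (pbAt lines i) (lines.drop i) out bk := by
  intro n
  induction n with
  | zero =>
    intro i h out bk
    have hi : ¬ i < lines.length := by omega
    rw [aLoop, List.drop_eq_nil_of_le (by omega), gSpec_nil]
    simp [hi]
  | succ n ih =>
    intro i h out bk
    by_cases hi : i < lines.length
    · rw [aLoop, List.drop_eq_getElem_cons hi, gSpec_cons]
      simp only [hi, reduceDIte]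
      have hcomm : ((PySem.Chars.startswith lines[i] ['<']
            && (decide (i = 0) || (PySem.Chars.strip (lines.getD (i - 1) []) == []))) = true)
          ↔ ((pbAt lines i && PySem.Chars.startswith lines[i] ['<']) = true) := by
        unfold pbAt; rw [Bool.and_comm]
      by_cases hc : (PySem.Chars.startswith lines[i] ['<']
          && (decide (i = 0) || (PySem.Chars.strip (lines.getD (i - 1) []) == []))) = true
      · rw [if_pos hc, if_pos (hcomm.mp hc), aInner_spec]
        simp only [List.singleton_append]
        rw [ih (i + 1 + ((lines.drop (i + 1)).takeWhile
              (fun x => !(PySem.Chars.strip x == []))).length) (by omega) _ _]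
        rw [pbAt_after_run lines i hi (by simp only [Bool.and_eq_true] at hc; exact hc.1)]
        rw [← List.drop_drop, drop_length_takeWhile]
      · rw [if_neg hc, if_neg (fun hx => hc (hcomm.mpr hx)), ih (i + 1) (by omega)]
        have : pbAt lines (i + 1) = (PySem.Chars.strip lines[i] == []) := by
          unfold pbAt
          simp [List.getD_eq_getElem?_getD, List.getElem?_eq_getElem hi]
        rw [this]
    · rw [aLoop, List.drop_eq_nil_of_le (by omega), gSpec_nil]
      simp [hi]

lemma aLoop_eq_gSpec (lines : List (List Char)) (i : Nat) (out : List (List Char))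
    (bk : PySem.Dict String String) :
    aLoop lines i out bk = gSpec (pbAt lines i) (lines.drop i) out bk :=
  aLoop_eq_aux lines (lines.length - i) i le_rfl out bk

-- ---- B-side: grouping then processing equals gSpec ----

lemma bGroups_run (b : Bool) (l : List Char) (rest : List (List Char))
    (hb : (PySem.Chars.strip l == []) = b) :
    bGroups (l :: rest) =
      (b, l :: rest.takeWhile (fun x => ((PySem.Chars.strip x == []) == b))) ::
        bGroups (rest.dropWhile (fun x => ((PySem.Chars.strip x == []) == b))) := by
  induction rest generalizing b l with
  | nil => simp [bGroups, bStep, hb]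
  | cons r rs ih =>
    have hcons : bGroups (l :: r :: rs) = bStep l (bGroups (r :: rs)) := rfl
    by_cases hc : (PySem.Chars.strip r == []) = b
    · rw [List.takeWhile_cons_of_pos (by simp [hc]), List.dropWhile_cons_of_pos (by simp [hc]),
        hcons, ih b r hc]
      simp [bStep, hb]
    · have hc' : (PySem.Chars.strip r == []) = !b := by
        revert hc; cases hx : (PySem.Chars.strip r == []) <;> cases b <;> simp
      rw [List.takeWhile_cons_of_neg (by simp [hc']), List.dropWhile_cons_of_neg (by simp [hc']),
        hcons, ih (!b) r hc']
      simp [bStep, hb]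

lemma gSpec_pb_irrel (d : List (List Char))
    (hd : ∀ x, d.head? = some x → PySem.Chars.startswith x ['<'] = false)
    (pb pb' : Bool) (out : List (List Char)) (bk : PySem.Dict String String) :
    gSpec pb d out bk = gSpec pb' d out bk := by
  cases d with
  | nil => rw [gSpec_nil, gSpec_nil]
  | cons x xs =>
    have hx : PySem.Chars.startswith x ['<'] = false := hd x rfl
    rw [gSpec_cons, gSpec_cons, hx]
    simp

lemma gSpec_blank_run (t : List (List Char))
    (ht : ∀ x ∈ t, (PySem.Chars.strip x == []) = true) :
    ∀ (d : List (List Char)) (out : List (List Char)) (bk : PySem.Dict String String),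
      gSpec true (t ++ d) out bk = gSpec true d (out ++ t) bk := by
  induction t with
  | nil => simp
  | cons x ts ih =>
    intro d out bk
    have hx : (PySem.Chars.strip x == []) = true := ht x (by simp)
    rw [List.cons_append, gSpec_cons, blank_not_startswith x hx]
    simp only [Bool.and_false, Bool.false_eq_true, if_false, hx]
    rw [ih (fun y hy => ht y (by simp [hy])) d (out ++ [x]) bk]
    simp [List.append_assoc]

lemma gSpec_nonblank_run (t : List (List Char))
    (ht : ∀ x ∈ t, (PySem.Chars.strip x == []) = false) :
    ∀ (d : List (List Char)) (out : List (List Char)) (bk : PySem.Dict String String),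
      gSpec false (t ++ d) out bk = gSpec false d (out ++ t) bk := by
  induction t with
  | nil => simp
  | cons x ts ih =>
    intro d out bk
    have hx : (PySem.Chars.strip x == []) = false := ht x (by simp)
    rw [List.cons_append, gSpec_cons]
    simp only [Bool.false_and, Bool.false_eq_true, if_false, hx]
    rw [ih (fun y hy => ht y (by simp [hy])) d (out ++ [x]) bk]
    simp [List.append_assoc]

def bRun (groups : List (Bool × List (List Char))) (out : List (List Char))
    (bk : PySem.Dict String String) : String × (List (String × String)) :=
  let r := bProcess groups out bk
  (String.ofList (PySem.Chars.join ['\n'] r.1), r.2.items)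

lemma bRun_eq_gSpec (n : Nat) :
    ∀ (ls : List (List Char)), ls.length ≤ n →
    ∀ (out : List (List Char)) (bk : PySem.Dict String String),
      bRun (bGroups ls) out bk = gSpec true ls out bk := by
  induction n with
  | zero =>
    intro ls h out bk
    have hnil : ls = [] := by cases ls <;> simp_all
    subst hnil
    rw [gSpec_nil]; rfl
  | succ n ih =>
    intro ls h out bk
    cases ls with
    | nil => rw [gSpec_nil]; rfl
    | cons l rest =>
      have hlen : rest.length ≤ n := by simp at h; omega
      cases hb : (PySem.Chars.strip l == []) with
      | true =>
        rw [bGroups_run true l rest hb]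
        have hstep : bRun ((true, l :: rest.takeWhile (fun x => ((PySem.Chars.strip x == []) == true)))
              :: bGroups (rest.dropWhile (fun x => ((PySem.Chars.strip x == []) == true)))) out bk
            = bRun (bGroups (rest.dropWhile (fun x => ((PySem.Chars.strip x == []) == true))))
              (out ++ (l :: rest.takeWhile (fun x => ((PySem.Chars.strip x == []) == true)))) bk := by
          simp [bRun, bProcess]
        rw [hstep, ih _ (Nat.le_trans (List.length_dropWhile_le _ _) hlen)]
        rw [gSpec_cons, blank_not_startswith l hb]
        simp only [Bool.and_false, Bool.false_eq_true, if_false, hb]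
        conv_rhs => rw [← List.takeWhile_append_dropWhile
          (p := fun x => ((PySem.Chars.strip x == []) == true)) (l := rest)]
        rw [gSpec_blank_run (rest.takeWhile (fun x => ((PySem.Chars.strip x == []) == true)))
          (fun x hx => by simpa using List.mem_takeWhile_imp hx)]
        rw [List.append_cons]
      | false =>
        rw [bGroups_run false l rest hb]
        have hfun : (fun x : List Char => ((PySem.Chars.strip x == []) == false))
            = (fun x => !(PySem.Chars.strip x == [])) := by
          funext x; cases (PySem.Chars.strip x == []) <;> rfl
        rw [hfun]
        have hDlen : (rest.dropWhile (fun x => !(PySem.Chars.strip x == []))).length ≤ n :=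
          Nat.le_trans (List.length_dropWhile_le _ _) hlen
        have hDirr : ∀ x, (rest.dropWhile (fun x => !(PySem.Chars.strip x == []))).head? = some x →
            PySem.Chars.startswith x ['<'] = false := by
          intro x hx
          have hne : rest.dropWhile (fun x => !(PySem.Chars.strip x == [])) ≠ [] := by
            intro hnil; rw [hnil] at hx; simp at hx
          have hhd := List.head_dropWhile_not (fun y => !(PySem.Chars.strip y == [])) hne
          rw [List.head?_eq_some_head hne] at hx
          have hxe : x = (rest.dropWhile (fun x => !(PySem.Chars.strip x == []))).head hne :=
            (Option.some.inj hx).symm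
          apply blank_not_startswith
          rw [hxe]
          simpa using hhd
        by_cases hsw : PySem.Chars.startswith l ['<'] = true
        · have hstep : bRun ((false, l :: rest.takeWhile (fun x => !(PySem.Chars.strip x == [])))
                :: bGroups (rest.dropWhile (fun x => !(PySem.Chars.strip x == [])))) out bk
              = bRun (bGroups (rest.dropWhile (fun x => !(PySem.Chars.strip x == []))))
                (out ++ ["HTMLBLOCK".toList ++ PySem.Int.toChars (PySem.Dict.size bk) ++ "X".toList])
                (bk.insert (String.ofList ("HTMLBLOCK".toList ++ PySem.Int.toChars (PySem.Dict.size bk) ++ "X".toList))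
                  (String.ofList (PySem.Chars.join ['\n']
                    (l :: rest.takeWhile (fun x => !(PySem.Chars.strip x == [])))))) := by
            simp [bRun, bProcess, hsw]
          rw [hstep, ih _ hDlen, gSpec_cons]
          simp only [hsw, Bool.and_true, if_true]
          exact gSpec_pb_irrel _ hDirr true false _ _
        · have hsw' : PySem.Chars.startswith l ['<'] = false := by simpa using hsw
          have hstep : bRun ((false, l :: rest.takeWhile (fun x => !(PySem.Chars.strip x == [])))
                :: bGroups (rest.dropWhile (fun x => !(PySem.Chars.strip x == [])))) out bk
              = bRun (bGroups (rest.dropWhile (fun x => !(PySem.Chars.strip x == []))))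
                (out ++ (l :: rest.takeWhile (fun x => !(PySem.Chars.strip x == [])))) bk := by
            simp [bRun, bProcess, hsw']
          rw [hstep, ih _ hDlen, gSpec_cons, hsw']
          simp only [Bool.and_false, Bool.false_eq_true, if_false, hb]
          conv_rhs => rw [← List.takeWhile_append_dropWhile
            (p := fun x => !(PySem.Chars.strip x == [])) (l := rest)]
          rw [gSpec_nonblank_run (rest.takeWhile (fun x => !(PySem.Chars.strip x == [])))
            (fun x hx => by simpa using List.mem_takeWhile_imp hx)]
          rw [List.append_cons]
          exact (gSpec_pb_irrel _ hDirr true false _ _).symm ▸ rfl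

-- ===== VERDICT (by name: the statement is the Claim_ definition above) =====
theorem extract_html_blocks_spec : Claim_equal_extract_html_blocks := by
  intro text _
  unfold Spec_extract_html_blocks extract_html_blocks extract_html_blocks_alt
  rw [aLoop_eq_gSpec]
  have hb := bRun_eq_gSpec (PySem.Chars.splitOn text.toList ['\n']).length
      (PySem.Chars.splitOn text.toList ['\n']) le_rfl [] PySem.Dict.empty
  have hpb : pbAt (PySem.Chars.splitOn text.toList ['\n']) 0 = true := by simp [pbAt]
  rw [List.drop_zero, hpb, ← hb]
  rfl
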